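-- pv_equiv track=rewrite | github.com/Katarina-Kovacova/Hangman | hangman.py | update_hidden_word
-- ===== SOURCE A (Python) =====
-- def update_hidden_word(positions, ran_word): # this function will disclose correct positions in hidden_word and hide not guessed letter
--
-- 	result = []
-- 	# This is going to be positions will equal 0 and 2. Ran word is CAT
-- 	for i, char in enumerate(ran_word):
-- 		if i not in positions:
-- 			# 1 is not in positions therefore we can expose index 1 (which is A)
-- 			result.append(char)
-- 		else:
-- 			# 0 and 2 are not in positions therefore we must return * to keep them hidden
-- 			result.append('_')
-- 	return ' '.join(result) # '**e'
-- ===== SOURCE B (Python) =====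
-- def update_hidden_word(positions, ran_word):
--     result = list(ran_word)
--     for p in positions:
--         if 0 <= p < len(ran_word):
--             result[p] = '_'
--     return ' '.join(result)
-- ===== Notes on version B (the rewrite author's own statement) =====
-- stated objective: faster
-- what changed: B starts from the word's characters and overwrites the positions to hide with '_' by direct indexed assignment (bounds-guarded), instead of scanning every character with an 'i not in positions' membership test.
import Mathlib
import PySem

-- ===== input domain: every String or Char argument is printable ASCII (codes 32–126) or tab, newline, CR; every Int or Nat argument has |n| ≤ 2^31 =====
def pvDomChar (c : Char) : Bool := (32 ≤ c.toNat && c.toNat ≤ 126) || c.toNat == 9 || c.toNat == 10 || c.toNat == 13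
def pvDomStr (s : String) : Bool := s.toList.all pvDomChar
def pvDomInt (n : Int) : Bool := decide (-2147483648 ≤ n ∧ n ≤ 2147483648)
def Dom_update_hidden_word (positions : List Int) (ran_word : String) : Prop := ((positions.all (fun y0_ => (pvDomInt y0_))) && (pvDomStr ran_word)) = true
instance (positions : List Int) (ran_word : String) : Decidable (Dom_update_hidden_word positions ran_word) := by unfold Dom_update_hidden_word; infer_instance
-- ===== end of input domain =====

-- B overwrites the hidden positions in a copy of the word's characters by indexed
-- assignment instead of A's per-character 'i not in positions' membership scan.

-- ===== PORT A =====
def update_hidden_word (positions : List Int) (ran_word : String) : String :=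
  let result : List (List Char) :=
    (PySem.List.enumerate ran_word.toList).foldl
      (fun acc ic => if ic.1 ∉ positions then acc ++ [[ic.2]] else acc ++ [['_']]) []
  String.mk (PySem.Chars.join [' '] result)

-- ===== PORT B =====
def update_hidden_word_alt (positions : List Int) (ran_word : String) : String :=
  let result : List Char :=
    positions.foldl
      (fun r p => if 0 ≤ p ∧ p < (ran_word.toList.length : Int) then r.set p.toNat '_' else r)
      ran_word.toList
  String.mk (PySem.Chars.join [' '] (result.map (fun c => [c])))

-- ===== PRECONDITION & SPEC =====
def Spec_update_hidden_word (positions : List Int) (ran_word : String) (out : String) : Prop := out = update_hidden_word_alt positions ran_word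
instance (positions : List Int) (ran_word : String) (out : String) : Decidable (Spec_update_hidden_word positions ran_word out) := by unfold Spec_update_hidden_word; infer_instance

-- ===== CLAIM (what is proved, stated in full; the proofs are below) =====
def Claim_equal_update_hidden_word : Prop := ∀ (positions : List Int) (ran_word : String), Dom_update_hidden_word positions ran_word → Spec_update_hidden_word positions ran_word (update_hidden_word positions ran_word)

-- ===== LEMMAS AND PROOFS =====

-- A's loop: appending one singleton per enumerated character is a map.
theorem pvA_fold (positions : List Int) :
    ∀ (l : List (Int × Char)) (acc : List (List Char)),
      l.foldl (fun acc ic => if ic.1 ∉ positions then acc ++ [[ic.2]] else acc ++ [['_']]) acc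
        = acc ++ l.map (fun ic => if ic.1 ∉ positions then [ic.2] else ['_']) := by
  intro l
  induction l with
  | nil => simp
  | cons x xs ih =>
      intro acc
      simp only [List.foldl_cons, List.map_cons]
      split <;> rename_i h <;> rw [ih] <;> simp

-- B's loop: the fold of guarded sets keeps the length and masks exactly the members.
theorem pvB_fold (n : Nat) :
    ∀ (ps : List Int) (r : List Char), r.length = n →
      (ps.foldl (fun r p => if 0 ≤ p ∧ p < (n : Int) then r.set p.toNat '_' else r) r).length = n ∧
      ∀ (i : Nat), i < n →
        (ps.foldl (fun r p => if 0 ≤ p ∧ p < (n : Int) then r.set p.toNat '_' else r) r)[i]? =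
          if ((i : Int) ∈ ps) then some '_' else r[i]? := by
  intro ps
  induction ps with
  | nil => intro r hr; exact ⟨hr, by intro i hi; simp⟩
  | cons p ps ih =>
      intro r hr
      have hlen' : (if 0 ≤ p ∧ p < (n : Int) then r.set p.toNat '_' else r).length = n := by
        split <;> simp [hr]
      obtain ⟨h1, h2⟩ := ih _ hlen'
      refine ⟨by simpa using h1, ?_⟩
      intro i hi
      rw [List.foldl_cons, h2 i hi]
      by_cases hmem : (i : Int) ∈ ps
      · simp [List.mem_cons, hmem]
      · by_cases hpi : p = (i : Int)
        · have hg : 0 ≤ p ∧ p < (n : Int) := by constructor <;> omega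
          have hti : p.toNat = i := by omega
          have hmemc : (i : Int) ∈ p :: ps := by simp [List.mem_cons, hpi]
          rw [if_neg hmem, if_pos hmemc, if_pos hg, hti,
              List.getElem?_set_self (by omega)]
        · have hmemc : ¬ ((i : Int) ∈ p :: ps) := by
            simp only [List.mem_cons, not_or]; exact ⟨fun h => hpi h.symm, hmem⟩
          simp only [hmem, if_false, hmemc]
          split
          · rw [List.getElem?_set_ne (by omega)]
          · rfl

theorem pv_core (positions : List Int) (ran_word : String) :
    update_hidden_word positions ran_word = update_hidden_word_alt positions ran_word := by
  have hA := pvA_fold positions (PySem.List.enumerate ran_word.toList) []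
  obtain ⟨h1, h2⟩ := pvB_fold ran_word.toList.length positions ran_word.toList rfl
  unfold update_hidden_word update_hidden_word_alt
  refine congrArg (fun l => String.mk (PySem.Chars.join [' '] l)) ?_
  rw [hA, List.nil_append]
  apply List.ext_getElem
  · rw [List.length_map, List.length_map, PySem.List.length_enumerate, h1]
  · intro i hiA hiB
    have hi : i < ran_word.toList.length := by
      rw [List.length_map, PySem.List.length_enumerate] at hiA; exact hiA
    have hB : (positions.foldl
        (fun r p => if 0 ≤ p ∧ p < (ran_word.toList.length : Int) then r.set p.toNat '_' else r)
        ran_word.toList)[i]'(by omega) =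
        if ((i : Int) ∈ positions) then '_' else ran_word.toList[i]'hi := by
      have := h2 i hi
      rw [List.getElem?_eq_getElem (by omega)] at this
      by_cases hmem : (i : Int) ∈ positions
      · simp only [hmem, if_true] at this ⊢; exact Option.some.inj this
      · simp only [hmem, if_false, List.getElem?_eq_getElem hi] at this ⊢
        exact Option.some.inj this
    rw [List.getElem_map, List.getElem_map, PySem.List.getElem_enumerate, hB]
    by_cases hmem : (i : Int) ∈ positions <;> simp [hmem]

-- ===== VERDICT (by name: the statement is the Claim_ definition above) =====
theorem update_hidden_word_spec : Claim_equal_update_hidden_word := by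
  intro positions ran_word _
  exact pv_core positions ran_word
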